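-- pv_equiv track=rewrite | github.com/paiml/depyler | examples/hard_generators.py | state_machine_bracket_depth
-- ===== SOURCE A (Python) =====
-- def state_machine_bracket_depth(opens: list[int], closes: list[int]) -> list[int]:
--     """Simulate bracket depth tracking. opens=[positions of '('], closes=[positions of ')'].
--     Returns depth at each position from 0 to max_pos."""
--     max_pos: int = 0
--     for p in opens:
--         if p > max_pos:
--             max_pos = p
--     for p in closes:
--         if p > max_pos:
--             max_pos = p
--     depths: list[int] = []
--     depth: int = 0
--     for pos in range(max_pos + 1):
--         for o in opens:
--             if o == pos:
--                 depth += 1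
--         for c in closes:
--             if c == pos:
--                 depth -= 1
--         depths.append(depth)
--     return depths
-- ===== SOURCE B (Python) =====
-- def state_machine_bracket_depth(opens: list[int], closes: list[int]) -> list[int]:
--     """Difference array + prefix sum: O(n + max_pos) instead of A's O(n * max_pos)."""
--     max_pos = max([0] + opens + closes)
--     delta = [0] * (max_pos + 1)
--     for p in opens:
--         if p >= 0:
--             delta[p] += 1
--     for p in closes:
--         if p >= 0:
--             delta[p] -= 1
--     depths = []
--     depth = 0
--     for d in delta:
--         depth += d
--         depths.append(depth)
--     return depths
-- ===== Notes on version B (the rewrite author's own statement) =====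
-- stated objective: faster
-- what changed: Replaced the per-position scan of both input lists with a difference array filled in one pass per list followed by a single prefix-sum pass.
import Mathlib
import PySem

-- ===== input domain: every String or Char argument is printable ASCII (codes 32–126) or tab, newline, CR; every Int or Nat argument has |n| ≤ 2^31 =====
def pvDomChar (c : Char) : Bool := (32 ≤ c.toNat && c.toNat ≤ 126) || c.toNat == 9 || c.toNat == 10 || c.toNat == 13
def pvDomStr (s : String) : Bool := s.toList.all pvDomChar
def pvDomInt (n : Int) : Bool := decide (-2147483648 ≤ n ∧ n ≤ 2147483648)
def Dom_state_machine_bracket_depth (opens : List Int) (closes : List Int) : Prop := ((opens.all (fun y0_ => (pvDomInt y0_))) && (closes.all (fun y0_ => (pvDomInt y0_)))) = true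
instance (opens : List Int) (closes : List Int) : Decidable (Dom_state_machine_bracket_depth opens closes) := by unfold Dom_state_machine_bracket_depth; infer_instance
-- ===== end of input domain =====

-- B replaces A's per-position rescans of both lists by a difference array and one prefix-sum pass (asymptotically faster).

-- ===== PORT A =====
def state_machine_bracket_depth (opens : List Int) (closes : List Int) : List Int :=
  let max_pos : Int := opens.foldl (fun m p => if p > m then p else m) 0
  let max_pos : Int := closes.foldl (fun m p => if p > m then p else m) max_pos
  ((PySem.List.pyRange 0 (max_pos + 1) 1).foldl
    (fun (s : Int × List Int) pos =>
      let d := opens.foldl (fun d o => if o == pos then d + 1 else d) s.1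
      let d := closes.foldl (fun d c => if c == pos then d - 1 else d) d
      (d, s.2 ++ [d])) (0, [])).2

-- ===== PORT B =====
def state_machine_bracket_depth_alt (opens : List Int) (closes : List Int) : List Int :=
  let max_pos : Int := (PySem.List.max? (((0 : Int) :: opens) ++ closes) (fun x => x)).getD 0
  let delta : List Int := List.replicate (max_pos + 1).toNat 0
  let delta := opens.foldl
    (fun d p => if p ≥ 0 then PySem.List.pySetD d p (PySem.List.pyGetD d p 0 + 1) else d) delta
  let delta := closes.foldl
    (fun d p => if p ≥ 0 then PySem.List.pySetD d p (PySem.List.pyGetD d p 0 - 1) else d) delta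
  (delta.foldl (fun (s : Int × List Int) d => (s.1 + d, s.2 ++ [s.1 + d])) (0, [])).2

-- ===== PRECONDITION & SPEC =====
def Spec_state_machine_bracket_depth (opens : List Int) (closes : List Int) (out : List Int) : Prop := out = state_machine_bracket_depth_alt opens closes
instance (opens : List Int) (closes : List Int) (out : List Int) : Decidable (Spec_state_machine_bracket_depth opens closes out) := by unfold Spec_state_machine_bracket_depth; infer_instance

-- ===== CLAIM (what is proved, stated in full; the proofs are below) =====
def Claim_equal_state_machine_bracket_depth : Prop := ∀ (opens : List Int) (closes : List Int), Dom_state_machine_bracket_depth opens closes → Spec_state_machine_bracket_depth opens closes (state_machine_bracket_depth opens closes)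

-- ===== LEMMAS AND PROOFS =====

-- A's running-max loop is foldl max
theorem pv_runmax (l : List Int) (a : Int) :
    l.foldl (fun m p => if p > m then p else m) a = l.foldl max a := by
  induction l generalizing a with
  | nil => rfl
  | cons x t ih =>
      simp only [List.foldl_cons, ih]
      congr 1
      by_cases h : x > a <;> simp [h, max_def] <;> omega

-- A's inner decrement loop (the increment loop is PySem.List.foldl_beq_add_one)
theorem pv_count_sub (l : List Int) (v a : Int) :
    l.foldl (fun d c => if c == v then d - 1 else d) a = a - l.count v := by
  induction l generalizing a with
  | nil => simp
  | cons x t ih =>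
      rw [List.foldl_cons]
      by_cases h : x = v
      · rw [if_pos (beq_iff_eq.mpr h), ih, h, List.count_cons_self]
        push_cast; ring
      · rw [if_neg (by simp [h]), ih, List.count_cons_of_ne h]

-- folds with pointwise-equal step functions agree
theorem pv_foldl_ext {a b : Type} (f g : a -> b -> a) (l : List b) (init : a)
    (h : forall x y, f x y = g x y) : l.foldl f init = l.foldl g init := by
  have hfg : f = g := funext fun x => funext (h x)
  rw [hfg]

-- B's difference-array update loop preserves the length
theorem pv_upd_length (l : List Int) (c : Int) (d : List Int) :
    (l.foldl (fun d p => if p >= 0 then PySem.List.pySetD d p (PySem.List.pyGetD d p 0 + c) else d) d).length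
      = d.length := by
  induction l generalizing d with
  | nil => rfl
  | cons x t ih =>
      rw [List.foldl_cons]
      by_cases h : x >= 0
      · rw [if_pos h, ih, PySem.List.length_pySetD]
      · rw [if_neg h, ih]

-- B's difference-array update loop, pointwise: entry i grows by c per occurrence of i
theorem pv_upd_getElem (l : List Int) (c : Int) (d : List Int) (i : Nat) (hi : i < d.length) :
    (l.foldl (fun d p => if p >= 0 then PySem.List.pySetD d p (PySem.List.pyGetD d p 0 + c) else d) d)[i]'(by rw [pv_upd_length]; exact hi)
      = d[i] + c * l.count (i : Int) := by
  induction l generalizing d with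
  | nil => simp
  | cons x t ih =>
      simp only [List.foldl_cons]
      by_cases h : x >= 0
      · simp only [if_pos h]
        rw [ih _ (by rw [PySem.List.length_pySetD]; exact hi)]
        by_cases hx : x = (i : Int)
        · subst hx
          simp only [PySem.List.pySetD_of_nonneg _ _ h, PySem.List.pyGetD_natCast,
            Int.toNat_natCast, List.getElem_set_self, List.count_cons_self,
            List.getD_eq_getElem _ _ hi]
          push_cast; ring
        · have hne : x.toNat ≠ i := by omega
          simp only [PySem.List.pySetD_of_nonneg _ _ h, List.getElem_set_ne hne,
            List.count_cons_of_ne hx]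
      · simp only [if_neg h]
        rw [ih d hi]
        have hx : x ≠ (i : Int) := by omega
        rw [List.count_cons_of_ne hx]

theorem state_machine_bracket_depth_spec : Claim_equal_state_machine_bracket_depth := by
  intro opens closes _
  unfold Spec_state_machine_bracket_depth
  simp only [state_machine_bracket_depth, state_machine_bracket_depth_alt]
  set M := (opens ++ closes).foldl max 0 with hM
  have hAmax : closes.foldl (fun m p => if p > m then p else m)
      (opens.foldl (fun m p => if p > m then p else m) 0) = M := by
    rw [pv_runmax, pv_runmax, ← List.foldl_append]
  have hBmax : (PySem.List.max? (((0 : Int) :: opens) ++ closes) (fun x => x)).getD 0 = M := by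
    rw [List.cons_append, PySem.List.max?_id_cons, Option.getD_some]
  rw [hAmax, hBmax]
  -- the delta array is the pointwise count difference over positions 0..M
  have hdelta :
      closes.foldl (fun d p => if p >= 0 then PySem.List.pySetD d p (PySem.List.pyGetD d p 0 - 1) else d)
        (opens.foldl (fun d p => if p >= 0 then PySem.List.pySetD d p (PySem.List.pyGetD d p 0 + 1) else d)
          (List.replicate (M + 1).toNat 0))
      = (List.range (M + 1).toNat).map
          (fun (i : Nat) => ((opens.count ((i : Int)) : Int) - (closes.count ((i : Int)) : Int))) := by
    simp only [sub_eq_add_neg]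
    apply List.ext_getElem
    · rw [pv_upd_length, pv_upd_length]; simp
    · intro i h1 h2
      have hrep : i < (List.replicate (M + 1).toNat (0 : Int)).length := by
        rw [pv_upd_length, pv_upd_length] at h1; exact h1
      rw [pv_upd_getElem closes (-1) _ i (by rw [pv_upd_length]; exact hrep)]
      rw [pv_upd_getElem opens 1 _ i hrep]
      rw [List.getElem_replicate]
      rw [List.getElem_map, List.getElem_range]
      ring
  rw [hdelta]
  rw [PySem.List.pyRange_one]
  have hsz : ((M : Int) + 1 - 0) = M + 1 := by ring
  rw [hsz]
  rw [List.foldl_map, List.foldl_map]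
  refine congrArg Prod.snd (pv_foldl_ext _ _ _ _ ?_)
  intro s k
  simp only [PySem.List.foldl_beq_add_one, pv_count_sub, zero_add]
  rw [show s.1 + (opens.count ((k : Int)) : Int) - (closes.count ((k : Int)) : Int)
      = s.1 + ((opens.count ((k : Int)) : Int) - (closes.count ((k : Int)) : Int)) from by ring]

-- ===== VERDICT (by name: the statement is the Claim_ definition above) =====
-- (the theorem above is the verdict)
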